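-- pv_equiv track=rewrite | github.com/DGomez1122/Portafolio2 | Devolver Indices.py | AuxDevolverIndices
-- ===== SOURCE A (Python) =====
-- def AuxDevolverIndices(lista,lista2,cont,resultado):
--     if lista2==[]:
--         return resultado
--     else:
--         if lista2[0]==lista[0]:
--             return AuxDevolverIndices(lista[1:],lista2[1:],cont+1,resultado+[cont])
--         else:
--             return AuxDevolverIndices(lista[1:],lista2,cont+1,resultado)
-- ===== SOURCE B (Python) =====
-- def AuxDevolverIndices(lista, lista2, cont, resultado):
--     res = resultado
--     i = 0
--     j = 0
--     while j < len(lista2):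
--         if lista2[j] == lista[i]:
--             res = res + [cont]
--             j += 1
--         i += 1
--         cont += 1
--     return res
-- ===== Notes on version B (the rewrite author's own statement) =====
-- stated objective: idiomatic
-- what changed: Replaces the slice-building recursion with a while-loop over two indices i,j, appending cont on each match; no per-step lista[1:] copies.
import Mathlib
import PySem

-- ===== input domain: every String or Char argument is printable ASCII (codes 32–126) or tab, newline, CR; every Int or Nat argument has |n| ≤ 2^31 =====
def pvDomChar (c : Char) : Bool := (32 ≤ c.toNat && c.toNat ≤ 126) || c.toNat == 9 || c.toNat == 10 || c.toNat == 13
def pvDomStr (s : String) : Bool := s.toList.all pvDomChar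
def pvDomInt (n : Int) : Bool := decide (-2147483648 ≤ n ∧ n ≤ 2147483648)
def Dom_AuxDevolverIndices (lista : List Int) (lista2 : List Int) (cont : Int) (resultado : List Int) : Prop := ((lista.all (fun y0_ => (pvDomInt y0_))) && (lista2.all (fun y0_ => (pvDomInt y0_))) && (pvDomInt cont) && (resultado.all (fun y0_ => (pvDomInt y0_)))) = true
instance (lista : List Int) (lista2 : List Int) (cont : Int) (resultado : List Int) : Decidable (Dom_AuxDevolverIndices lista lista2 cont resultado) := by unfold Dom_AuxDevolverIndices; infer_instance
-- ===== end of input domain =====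

-- B replaces A's slice-building recursion by a while-loop with two indices (no per-step list slices); equivalence is about the RETURN value only.

-- ===== PORT A =====
-- Literal port of A's recursion; when lista2 ≠ [] and lista = [] Python raises IndexError
-- (lista[0]); the port returns resultado there, and Pre_ excludes those inputs.
def AuxDevolverIndices (lista : List Int) (lista2 : List Int) (cont : Int) (resultado : List Int) : List Int :=
  match lista2 with
  | [] => resultado
  | b :: bs =>
    match lista with
    | [] => resultado   -- IndexError in Python; outside Pre_
    | a :: rest =>
      if b = a then AuxDevolverIndices rest bs (cont + 1) (resultado ++ [cont])
      else AuxDevolverIndices rest (b :: bs) (cont + 1) resultado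

-- ===== PORT B =====
-- the while-loop of Source B; lista[i] is PySem-style lista[i]? (none = IndexError, outside Pre_, where the loop stops with the current res)
def AuxDevolverIndicesGo (lista : List Int) (lista2 : List Int) (i j : Nat) (cont : Int) (res : List Int) : List Int :=
  if j < lista2.length then
    match h : lista[i]? with
    | none => res   -- IndexError in Python; outside Pre_
    | some x =>
      if lista2[j]?.getD 0 = x then
        AuxDevolverIndicesGo lista lista2 (i + 1) (j + 1) (cont + 1) (res ++ [cont])
      else
        AuxDevolverIndicesGo lista lista2 (i + 1) j (cont + 1) res
  else res
termination_by lista.length - i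
decreasing_by
  all_goals
    have hi : i < lista.length := by
      by_contra hc
      exact absurd h (by simp [List.getElem?_eq_none (Nat.le_of_not_lt hc)])
    omega

def AuxDevolverIndices_alt (lista : List Int) (lista2 : List Int) (cont : Int) (resultado : List Int) : List Int :=
  AuxDevolverIndicesGo lista lista2 0 0 cont resultado

-- ===== PRECONDITION & SPEC =====
-- Pre_ excludes exactly the inputs where both Pythons raise IndexError: lista2 not a subsequence of lista (lista runs out before lista2 is fully matched).
def Pre_AuxDevolverIndices (lista : List Int) (lista2 : List Int) (cont : Int) (resultado : List Int) : Prop := lista2.Sublist lista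
instance (lista : List Int) (lista2 : List Int) (cont : Int) (resultado : List Int) : Decidable (Pre_AuxDevolverIndices lista lista2 cont resultado) := by unfold Pre_AuxDevolverIndices; infer_instance
def pvWitness_AuxDevolverIndices : List Int × List Int × Int × List Int := ([5, 3, 7, 3], [3, 7], 0, [9])

def Spec_AuxDevolverIndices (lista : List Int) (lista2 : List Int) (cont : Int) (resultado : List Int) (out : List Int) : Prop := out = AuxDevolverIndices_alt lista lista2 cont resultado
instance (lista : List Int) (lista2 : List Int) (cont : Int) (resultado : List Int) (out : List Int) : Decidable (Spec_AuxDevolverIndices lista lista2 cont resultado out) := by unfold Spec_AuxDevolverIndices; infer_instance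

-- ===== CLAIM (what is proved, stated in full; the proofs are below) =====
def Claim_equal_AuxDevolverIndices : Prop := ∀ (lista : List Int) (lista2 : List Int) (cont : Int) (resultado : List Int), Dom_AuxDevolverIndices lista lista2 cont resultado → Pre_AuxDevolverIndices lista lista2 cont resultado → Spec_AuxDevolverIndices lista lista2 cont resultado (AuxDevolverIndices lista lista2 cont resultado)

-- ===== LEMMAS AND PROOFS =====
lemma aux_key (lista lista2 : List Int) : ∀ (n i j : Nat) (cont : Int) (res : List Int),
    lista.length - i = n → j ≤ lista2.length → (lista2.drop j).Sublist (lista.drop i) →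
    AuxDevolverIndices (lista.drop i) (lista2.drop j) cont res
      = AuxDevolverIndicesGo lista lista2 i j cont res := by
  intro n
  induction n with
  | zero =>
    intro i j cont res hn hj hsub
    have hi : lista.length ≤ i := by omega
    have hdi : lista.drop i = [] := List.drop_eq_nil_of_le hi
    rw [hdi] at hsub
    have hdj : lista2.drop j = [] := List.sublist_nil.mp hsub
    have hjlen : ¬ j < lista2.length := by
      have := List.drop_eq_nil_iff.mp hdj; omega
    rw [hdi, hdj]
    rw [AuxDevolverIndicesGo, if_neg hjlen]
    simp [AuxDevolverIndices]
  | succ n ih =>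
    intro i j cont res hn hj hsub
    have hi : i < lista.length := by omega
    have hdropA : lista.drop i = lista[i] :: lista.drop (i + 1) := List.drop_eq_getElem_cons hi
    have hgi : lista[i]? = some lista[i] := List.getElem?_eq_getElem hi
    by_cases hjlen : j < lista2.length
    · have hdropB : lista2.drop j = lista2[j] :: lista2.drop (j + 1) := List.drop_eq_getElem_cons hjlen
      have hgj : lista2[j]?.getD 0 = lista2[j] := by simp [List.getElem?_eq_getElem hjlen]
      rw [AuxDevolverIndicesGo, if_pos hjlen, hgi]
      simp only [hgj]
      by_cases heq : lista2[j] = lista[i]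
      · have hsub' : (lista2.drop (j + 1)).Sublist (lista.drop (i + 1)) := by
          rw [hdropA, hdropB, heq] at hsub
          exact List.cons_sublist_cons.mp hsub
        rw [if_pos heq, hdropA, hdropB]
        simp only [AuxDevolverIndices, if_pos heq]
        exact ih (i + 1) (j + 1) (cont + 1) (res ++ [cont]) (by omega) hjlen hsub'
      · have hsub' : (lista2.drop j).Sublist (lista.drop (i + 1)) := by
          rw [hdropA, hdropB] at hsub
          rcases List.sublist_cons_iff.mp hsub with h | ⟨r, hr, _⟩
          · rw [hdropB]; exact h
          · exact absurd (List.cons.inj hr).1 heq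
        rw [if_neg heq, hdropA, hdropB]
        simp only [AuxDevolverIndices, if_neg heq]
        rw [← hdropB]
        exact ih (i + 1) j (cont + 1) res (by omega) hj hsub'
    · have hdj : lista2.drop j = [] := by
        have : j = lista2.length := by omega
        simp [this]
      rw [AuxDevolverIndicesGo, if_neg hjlen, hdj]
      simp [AuxDevolverIndices]

-- ===== VERDICT (by name: the statement is the Claim_ definition above) =====
theorem AuxDevolverIndices_spec : Claim_equal_AuxDevolverIndices := by
  intro lista lista2 cont resultado _ hpre
  unfold Spec_AuxDevolverIndices AuxDevolverIndices_alt
  have h := aux_key lista lista2 (lista.length - 0) 0 0 cont resultado rfl (Nat.zero_le _) (by simpa using hpre)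
  simpa using h
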